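-- pv_equiv track=rewrite | github.com/andrewkim316/checkers_player | utils.py | get_jumps
-- ===== SOURCE A (Python) =====
-- def get_jumps(board, loc, turn):
--     offset = get_offset(turn)
--     outcomes = []
--     new_locs = [(loc[0] + offset, loc[1] - 1), (loc[0] + offset, loc[1] + 1)]
--
--     to_check = []
--     for i in range(len(new_locs)):
--         to_check.append(not is_on_board(new_locs[i]) or not can_jump(turn, board[new_locs[i][0]][new_locs[i][1]]))
--
--     for i in range(len(to_check)):
--         if not to_check[i]:
--             jump = (new_locs[i][0] + (new_locs[i][0] - loc[0]), new_locs[i][1] + (new_locs[i][1] - loc[1]))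
--             if is_on_board(jump) and board[jump[0]][jump[1]] == 0:
--                 board_copy = copy_board(board)
--                 board_copy[new_locs[i][0]][new_locs[i][1]] = 0
--                 outcomes.extend(get_jumps(move(board_copy, loc, jump), jump, turn))
--
--     if len(outcomes) == 0:
--         outcomes.append(board)
--
--     return outcomes
--
-- def get_offset(turn):
--     if turn == 1:
--         return 1
--     else:
--         return -1
--
-- def can_jump(turn, target):
--     if turn == 1:
--         return target == 20 or target == 2
--     else:
--         return target == 10 or target == 1
--
-- def move(board, old, new):
--     board_copy = copy_board(board)
--     temp = board_copy[old[0]][old[1]]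
--     board_copy[old[0]][old[1]] = board_copy[new[0]][new[1]]
--     board_copy[new[0]][new[1]] = temp
--
--     if temp == 1 and new[0] == len(board) - 1:
--         board_copy[new[0]][new[1]] = 10
--
--     if temp == 2 and new[0] == 0:
--         board_copy[new[0]][new[1]] = 20
--
--     return board_copy
--
-- def is_on_board(coords):
--     return coords[0] >= 0 and coords[0] < 8 and coords[1] >= 0 and coords[1] < 8
--
-- def copy_board(board):
--     return list(map(list, board))
-- ===== SOURCE B (Python) =====
-- # B: iterative DFS with an explicit stack of (board, loc) frames instead of A's recursion;
-- # children are pushed in reversed order so leaves are emitted in A's left-to-right order.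
-- # Return-value equivalence only; neither A nor B mutates the caller's board.
--
-- def _offset(turn):
--     return 1 if turn == 1 else -1
--
-- def _can_jump(turn, target):
--     if turn == 1:
--         return target == 20 or target == 2
--     else:
--         return target == 10 or target == 1
--
-- def _on_board(c):
--     return 0 <= c[0] < 8 and 0 <= c[1] < 8
--
-- def _move(board, old, new):
--     b = [row[:] for row in board]
--     temp = b[old[0]][old[1]]
--     b[old[0]][old[1]] = b[new[0]][new[1]]
--     b[new[0]][new[1]] = temp
--     if temp == 1 and new[0] == len(board) - 1:
--         b[new[0]][new[1]] = 10
--     if temp == 2 and new[0] == 0: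
--         b[new[0]][new[1]] = 20
--     return b
--
-- def get_jumps(board, loc, turn):
--     off = _offset(turn)
--     outcomes = []
--     stack = [(board, loc)]
--     while stack:
--         b, l = stack.pop()
--         children = []
--         for d in (-1, 1):
--             nl = (l[0] + off, l[1] + d)
--             if _on_board(nl) and _can_jump(turn, b[nl[0]][nl[1]]):
--                 jp = (nl[0] + (nl[0] - l[0]), nl[1] + (nl[1] - l[1]))
--                 if _on_board(jp) and b[jp[0]][jp[1]] == 0:
--                     nb = [row[:] for row in b]
--                     nb[nl[0]][nl[1]] = 0
--                     children.append((_move(nb, l, jp), jp))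
--         if children:
--             stack.extend(reversed(children))
--         else:
--             outcomes.append(b)
--     return outcomes
-- ===== Notes on version B (the rewrite author's own statement) =====
-- stated objective: alternative
-- what changed: Replaces A's recursive DFS over jump outcomes with an iterative DFS driven by an explicit stack of (board, loc) frames, pushing children in reversed order so leaves are emitted in A's left-to-right order.
import Mathlib
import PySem

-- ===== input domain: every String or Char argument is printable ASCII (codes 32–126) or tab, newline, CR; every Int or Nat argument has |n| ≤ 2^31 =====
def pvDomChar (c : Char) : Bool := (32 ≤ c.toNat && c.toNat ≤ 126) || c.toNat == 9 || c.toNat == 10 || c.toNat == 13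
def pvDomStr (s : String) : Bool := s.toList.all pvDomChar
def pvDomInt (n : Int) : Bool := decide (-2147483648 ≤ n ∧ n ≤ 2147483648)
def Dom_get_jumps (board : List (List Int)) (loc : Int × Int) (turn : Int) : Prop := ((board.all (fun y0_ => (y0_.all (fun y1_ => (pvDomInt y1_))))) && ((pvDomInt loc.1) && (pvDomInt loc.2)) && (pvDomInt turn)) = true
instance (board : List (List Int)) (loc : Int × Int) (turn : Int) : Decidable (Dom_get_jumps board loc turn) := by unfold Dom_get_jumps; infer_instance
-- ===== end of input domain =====

-- B replaces A's recursion with an explicit stack of (board, loc) frames (iterative DFS,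
-- children pushed reversed); return-value equivalence only, neither side mutates its argument.

-- ===== PORT A =====
-- shared module helpers (both Python files carry identical copies of these)
def getOffset (turn : Int) : Int := if turn = 1 then 1 else -1

def canJump (turn target : Int) : Bool :=
  if turn = 1 then (target == 20 || target == 2) else (target == 10 || target == 1)

def isOnBoard (c : Int × Int) : Bool :=
  decide (0 ≤ c.1) && decide (c.1 < 8) && decide (0 ≤ c.2) && decide (c.2 < 8)

-- board[r][c] (Python negative-index semantics; the default 0 is reached only outside Pre_)
def cell (b : List (List Int)) (c : Int × Int) : Int :=
  PySem.List.pyGetD (PySem.List.pyGetD b c.1 []) c.2 0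

-- board[r][c] = v (Python negative-index semantics; identity only outside Pre_, where Python raises)
def setCell (b : List (List Int)) (c : Int × Int) (v : Int) : List (List Int) :=
  PySem.List.pySetD b c.1 (PySem.List.pySetD (PySem.List.pyGetD b c.1 []) c.2 v)

-- move(board, old, new): swap the two cells of a copy, then crown (uses len(board) of the argument)
def move (b : List (List Int)) (old new : Int × Int) : List (List Int) :=
  let temp := cell b old
  let b1 := setCell b old (cell b new)
  let b2 := setCell b1 new temp
  let b3 := if temp = 1 ∧ new.1 = (b.length : Int) - 1 then setCell b2 new 10 else b2
  if temp = 2 ∧ new.1 = 0 then setCell b3 new 20 else b3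

-- fuel guard for A's recursion: one more than the number of capturable cells; every capture
-- removes one such cell, so the guard value is never reached on inputs satisfying Pre_.
def enemyCount (board : List (List Int)) (turn : Int) : Nat :=
  (board.flatten.filter (fun v => canJump turn v)).length

-- literal transliteration of A's recursive body (fuel = totality guard only)
def jumpsA (fuel : Nat) (board : List (List Int)) (loc : Int × Int) (turn : Int) :
    List (List (List Int)) :=
  match fuel with
  | 0 => [board]
  | f + 1 =>
    let offset := getOffset turn
    let new_locs := [(loc.1 + offset, loc.2 - 1), (loc.1 + offset, loc.2 + 1)]
    let to_check := new_locs.map (fun nl => !(isOnBoard nl) || !(canJump turn (cell board nl)))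
    let outcomes := (List.range to_check.length).foldl (fun acc i =>
      if to_check.getD i true = false then
        let nl := new_locs.getD i (0, 0)
        let jump := (nl.1 + (nl.1 - loc.1), nl.2 + (nl.2 - loc.2))
        if isOnBoard jump && (cell board jump == 0) then
          acc ++ jumpsA f (move (setCell board nl 0) loc jump) jump turn
        else acc
      else acc) []
    if outcomes.length = 0 then [board] else outcomes

def get_jumps (board : List (List Int)) (loc : Int × Int) (turn : Int) : List (List (List Int)) :=
  jumpsA (enemyCount board turn + 1) board loc turn

-- ===== PORT B =====
-- one candidate jump in direction d, as in Source B's inner for-loop body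
def childB (board : List (List Int)) (loc : Int × Int) (turn : Int) (d : Int) :
    Option (List (List Int) × (Int × Int)) :=
  let nl := (loc.1 + getOffset turn, loc.2 + d)
  if isOnBoard nl && canJump turn (cell board nl) then
    let jp := (nl.1 + (nl.1 - loc.1), nl.2 + (nl.2 - loc.2))
    if isOnBoard jp && (cell board jp == 0) then
      some (move (setCell board nl 0) loc jp, jp)
    else none
  else none

def childrenB (board : List (List Int)) (loc : Int × Int) (turn : Int) :
    List (List (List Int) × (Int × Int)) :=
  (childB board loc turn (-1)).toList ++ (childB board loc turn 1).toList

theorem childrenB_len_le (board : List (List Int)) (loc : Int × Int) (turn : Int) :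
    (childrenB board loc turn).length ≤ 2 := by
  unfold childrenB
  cases childB board loc turn (-1) <;> cases childB board loc turn 1 <;> simp

-- Source B's while-loop: head of the frame list = top of the stack; each frame carries a fuel
-- totality guard (unreachable for the fuel get_jumps_alt supplies)
def goB (turn : Int) (frames : List (List (List Int) × (Int × Int) × Nat))
    (acc : List (List (List Int))) : List (List (List Int)) :=
  match frames with
  | [] => acc
  | (b, _, 0) :: rest => goB turn rest (acc ++ [b])
  | (b, l, f + 1) :: rest =>
    match h : childrenB b l turn with
    | [] => goB turn rest (acc ++ [b])
    | c :: cs => goB turn (((c :: cs).map (fun p => (p.1, p.2, f))) ++ rest) acc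
termination_by (frames.map (fun p => 3 ^ p.2.2)).sum
decreasing_by
  all_goals first
  | (simp only [List.map_cons, List.sum_cons, pow_zero, Nat.succ_eq_add_one]
     first
     | omega
     | (have hp : (0:Nat) < 3 ^ (f + 1) := Nat.pow_pos (by norm_num); omega))
  | (have hlen : (c :: cs).length ≤ 2 := h ▸ childrenB_len_le b l turn
     have hb : ((cs.map ((fun p => 3 ^ p.2.2) ∘ (fun p => (p.1, p.2, f)))).sum : Nat) ≤ 3 ^ f := by
       cases cs with
       | nil => simp
       | cons x xs =>
         have hx : xs = [] := by simp at hlen; cases xs <;> simp_all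
         subst hx; simp
     have h3 : (3:Nat) ^ (f + 1) = 3 ^ f + 3 ^ f + 3 ^ f := by ring
     have hp : (0:Nat) < 3 ^ f := Nat.pow_pos (by norm_num)
     simp only [Function.comp] at hb
     simp only [List.map_append, List.map_map, List.map_cons, List.sum_append, List.sum_cons,
       Nat.succ_eq_add_one]
     omega)

def get_jumps_alt (board : List (List Int)) (loc : Int × Int) (turn : Int) :
    List (List (List Int)) :=
  goB turn [(board, loc, enemyCount board turn + 1)] []

-- ===== PRECONDITION & SPEC =====
-- Pre_ excludes inputs on which A's board indexing can raise IndexError: it admits 8×8 boards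
-- with loc in Python's index range, plus any input whose two first-step candidate squares are
-- off-board or safely readable and not capturable (A then returns [board] touching nothing);
-- this conservatively also excludes some non-8×8 inputs on which A still returns (see cites).
def Pre_get_jumps (board : List (List Int)) (loc : Int × Int) (turn : Int) : Prop :=
  (board.length = 8 ∧ (∀ r ∈ board, r.length = 8) ∧
    -8 ≤ loc.1 ∧ loc.1 ≤ 7 ∧ -8 ≤ loc.2 ∧ loc.2 ≤ 7) ∨
  (∀ d ∈ [(-1 : Int), 1],
    isOnBoard (loc.1 + getOffset turn, loc.2 + d) = false ∨
    ((loc.1 + getOffset turn).toNat < board.length ∧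
     (loc.2 + d).toNat < (board.getD (loc.1 + getOffset turn).toNat []).length ∧
     canJump turn (cell board (loc.1 + getOffset turn, loc.2 + d)) = false))
instance (board : List (List Int)) (loc : Int × Int) (turn : Int) :
    Decidable (Pre_get_jumps board loc turn) := by unfold Pre_get_jumps; infer_instance

def pvWitness_get_jumps : List (List Int) × (Int × Int) × Int :=
  ([[0,0,0,0,0,0,0,0],[0,0,0,0,0,0,0,0],[0,0,0,0,0,0,0,0],[0,0,0,2,0,0,0,0],
    [0,0,0,0,0,0,0,0],[0,0,0,0,0,0,0,0],[0,0,0,0,0,0,0,0],[0,0,0,0,0,0,0,0]],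
   ((2 : Int), (2 : Int)), (1 : Int))

def Spec_get_jumps (board : List (List Int)) (loc : Int × Int) (turn : Int) (out : List (List (List Int))) : Prop := out = get_jumps_alt board loc turn
instance (board : List (List Int)) (loc : Int × Int) (turn : Int) (out : List (List (List Int))) : Decidable (Spec_get_jumps board loc turn out) := by unfold Spec_get_jumps; infer_instance

-- ===== CLAIM (what is proved, stated in full; the proofs are below) =====
def Claim_equal_get_jumps : Prop := ∀ (board : List (List Int)) (loc : Int × Int) (turn : Int), Dom_get_jumps board loc turn → Pre_get_jumps board loc turn → Spec_get_jumps board loc turn (get_jumps board loc turn)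

-- ===== LEMMAS AND PROOFS =====
theorem jumpsA_ne_nil (fuel : Nat) (b : List (List Int)) (l : Int × Int) (t : Int) :
    jumpsA fuel b l t ≠ [] := by
  cases fuel with
  | zero => simp [jumpsA]
  | succ f =>
    simp only [jumpsA]
    split
    · simp
    · rename_i h
      intro hc
      exact h (by rw [hc]; rfl)

set_option maxHeartbeats 2000000 in
theorem jumpsA_succ (f : Nat) (b : List (List Int)) (l : Int × Int) (t : Int) :
    jumpsA (f + 1) b l t =
      match childrenB b l t with
      | [] => [b]
      | ch => ch.flatMap (fun p => jumpsA f p.1 p.2 t) := by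
  simp only [jumpsA, childrenB, childB, List.map_cons, List.map_nil, List.length_cons,
    List.length_nil, show List.range 2 = [0,1] by decide, List.foldl_cons, List.foldl_nil,
    List.getD_cons_zero, show ∀ (x y : (Int × Int)) (d : Int × Int), [x,y].getD 1 d = y from fun _ _ _ => rfl,
    show ∀ (x y : Bool) (d : Bool), [x,y].getD 1 d = y from fun _ _ _ => rfl,
    show (l.2 + (-1 : Int)) = l.2 - 1 from by ring, ← Bool.not_and, Bool.not_eq_false']
  have hne : ∀ b' l', jumpsA f b' l' t ≠ [] := fun b' l' => jumpsA_ne_nil f b' l' t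
  by_cases e0 : (isOnBoard (l.1 + getOffset t, l.2 - 1) &&
      canJump t (cell b (l.1 + getOffset t, l.2 - 1))) = true <;>
  by_cases e1 : (isOnBoard (l.1 + getOffset t, l.2 + 1) &&
      canJump t (cell b (l.1 + getOffset t, l.2 + 1))) = true <;>
  by_cases g0 : (isOnBoard (l.1 + getOffset t + (l.1 + getOffset t - l.1), l.2 - 1 + (l.2 - 1 - l.2)) &&
      cell b (l.1 + getOffset t + (l.1 + getOffset t - l.1), l.2 - 1 + (l.2 - 1 - l.2)) == 0) = true <;>
  by_cases g1 : (isOnBoard (l.1 + getOffset t + (l.1 + getOffset t - l.1), l.2 + 1 + (l.2 + 1 - l.2)) &&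
      cell b (l.1 + getOffset t + (l.1 + getOffset t - l.1), l.2 + 1 + (l.2 + 1 - l.2)) == 0) = true <;>
  simp_all [List.length_eq_zero_iff, List.append_eq_nil_iff] <;>
  first
  | done
  | (try rw [← not_and] at g0
     try rw [← not_and] at g1
     try (replace e0 : ¬(isOnBoard (l.1 + getOffset t, l.2 - 1) = true ∧
            canJump t (cell b (l.1 + getOffset t, l.2 - 1)) = true) :=
            fun hc => absurd (e0 hc.1) (by simp [hc.2]))
     try (replace e1 : ¬(isOnBoard (l.1 + getOffset t, l.2 + 1) = true ∧
            canJump t (cell b (l.1 + getOffset t, l.2 + 1)) = true) :=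
            fun hc => absurd (e1 hc.1) (by simp [hc.2]))
     simp [e0, e1, g0, g1, hne])

-- The stack loop computes: accumulator ++ concatenation of A's results over the frames.
theorem goB_eq (t : Int) (frames : List (List (List Int) × (Int × Int) × Nat))
    (acc : List (List (List Int))) :
    goB t frames acc = acc ++ frames.flatMap (fun p => jumpsA p.2.2 p.1 p.2.1 t) := by
  fun_induction goB t frames acc with
  | case1 acc => simp
  | case2 acc b l rest ih => simp [ih, jumpsA]
  | case3 acc b l f rest h ih =>
    rw [ih]
    simp only [List.flatMap_cons, jumpsA_succ f b l t, h]
    simp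
  | case4 acc b l f rest c cs h ih =>
    rw [ih]
    simp only [List.flatMap_append, List.flatMap_map, List.flatMap_cons, jumpsA_succ f b l t, h]

-- ===== VERDICT (by name: the statement is the Claim_ definition above) =====
theorem get_jumps_spec : Claim_equal_get_jumps := by
  intro board loc turn _ _
  unfold Spec_get_jumps get_jumps get_jumps_alt
  rw [goB_eq]
  simp
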